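-- pv_equiv track=rewrite | github.com/ionesu/sandbox | tasks_examples/codility/airplane_reservations.py | solution
-- ===== SOURCE A (Python) =====
-- def solution(N: int, S: str) -> int:
--     if not S:
--         return 2 * N
--
--     left, right, mid = set(), set(), set()
--     count = 0
--
--     for r in S.split(' '):
--         if r[:-1] in left and r[:-1] in right and r[:-1] in mid:
--             continue
--
--         # check if reservation in BCDE
--         if r[-1] in 'BCDE':
--             left.add(r)
--         # check if reservation in FGHJ
--         if r[-1] in 'FGHJ':
--             right.add(r)
--         # check if reservation in DEFG
--         if r[-1] in 'DEFG':
--             mid.add(r)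
--
--     for i in (left | right | mid):
--         # check if seat not in 'BCDE' and not in 'FGHJ' than 2 families could seat in a row
--         if i not in left and i not in right:
--             count += 2
--         # check if seat not in 'DEFG' than 1 family could seat in a row
--         elif i not in mid:
--             count += 1
--         # check if seat not in 'BCDE' or not in 'FGHJ' than 1 family could seat in a row
--         elif i not in left or i not in right:
--             count += 1
--
--     # in all other rows 2 families can seat
--     count += 2 * (N - len(left | right | mid))
--
--     return count
-- ===== SOURCE B (Python) =====
-- def solution(N: int, S: str) -> int:
--     # answer = 2*N minus the number of distinct reservations blocking a family seat
--     return 2 * N - len({r for r in S.split(' ') if r and r[-1] in 'BCDEFGHJ'})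
-- ===== Notes on version B (the rewrite author's own statement) =====
-- stated objective: simpler
-- what changed: Replaces A's three-set build plus union-categorization loop with the closed form 2*N minus the count of distinct reservations whose seat letter lies in 'BCDEFGHJ' (one set comprehension); Pre_ excludes nonempty S with an empty space-split token, where A raises IndexError.
import Mathlib
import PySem

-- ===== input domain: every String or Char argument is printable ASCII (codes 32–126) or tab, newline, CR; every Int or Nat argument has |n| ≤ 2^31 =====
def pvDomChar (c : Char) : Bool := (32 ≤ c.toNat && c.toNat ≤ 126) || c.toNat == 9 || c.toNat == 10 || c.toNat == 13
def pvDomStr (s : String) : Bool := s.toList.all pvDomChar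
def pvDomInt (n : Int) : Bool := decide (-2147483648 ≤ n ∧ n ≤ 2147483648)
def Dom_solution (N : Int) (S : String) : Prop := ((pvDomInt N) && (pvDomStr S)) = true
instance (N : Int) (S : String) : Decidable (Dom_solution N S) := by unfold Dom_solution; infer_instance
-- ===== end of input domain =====

-- B replaces A's three-set build + union-categorization with the closed form
-- 2*N - #(distinct reservations whose seat letter is in 'BCDEFGHJ'): simpler, same cost.


-- ===== PORT A =====
-- the first loop of A: builds the three sets; `none` = IndexError at r[-1] (empty token)
def solLoopA : List (List Char) → PySem.Set (List Char) → PySem.Set (List Char) →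
    PySem.Set (List Char) → Option (PySem.Set (List Char) × PySem.Set (List Char) × PySem.Set (List Char))
  | [], left, right, mid => some (left, right, mid)
  | r :: rest, left, right, mid =>
    if left.contains (PySem.List.slice r none (some (-1))) &&
       right.contains (PySem.List.slice r none (some (-1))) &&
       mid.contains (PySem.List.slice r none (some (-1))) then
      solLoopA rest left right mid
    else
      match PySem.List.pyGet? r (-1) with
      | none => none
      | some c =>
        solLoopA rest
          (if (['B','C','D','E'] : List Char).contains c then left.add r else left)
          (if (['F','G','H','J'] : List Char).contains c then right.add r else right)
          (if (['D','E','F','G'] : List Char).contains c then mid.add r else mid)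

-- the second loop of A: Python iterates the union set; each element's contribution is
-- independent of the others, so the hash iteration order cannot affect this sum
def solCount (left right mid : PySem.Set (List Char)) (u : PySem.Set (List Char)) : Int :=
  u.foldl (fun count i =>
    if !left.contains i && !right.contains i then count + 2
    else if !mid.contains i then count + 1
    else if !left.contains i || !right.contains i then count + 1
    else count) 0

def solution (N : Int) (S : String) : Int :=
  if S.toList.isEmpty then 2 * N
  else
    match solLoopA (PySem.Chars.splitOn S.toList [' ']) PySem.Set.empty PySem.Set.empty PySem.Set.empty with
    | none => 0   -- Python raises IndexError here; excluded by Pre_solution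
    | some (left, right, mid) =>
      let u := (left.union right).union mid
      solCount left right mid u + 2 * (N - (((left.union right).union mid).length : Int))

-- ===== PORT B =====
def solBlocks (r : List Char) : Bool :=
  !r.isEmpty &&
    (match PySem.List.pyGet? r (-1) with
     | some c => (['B','C','D','E','F','G','H','J'] : List Char).contains c
     | none => false)

def solution_alt (N : Int) (S : String) : Int :=
  2 * N - ((PySem.Set.ofList ((PySem.Chars.splitOn S.toList [' ']).filter solBlocks)).length : Int)

-- ===== PRECONDITION & SPEC =====
-- Pre_ excludes exactly the inputs where A raises IndexError: nonempty S whose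
-- space-split contains an empty token (double, leading or trailing space).
def Pre_solution (N : Int) (S : String) : Prop :=
  S = "" ∨ [] ∉ PySem.Chars.splitOn S.toList [' ']
instance (N : Int) (S : String) : Decidable (Pre_solution N S) := by unfold Pre_solution; infer_instance
def pvWitness_solution : Int × String := (3, "1B 2F 3A")

def Spec_solution (N : Int) (S : String) (out : Int) : Prop := out = solution_alt N S
instance (N : Int) (S : String) (out : Int) : Decidable (Spec_solution N S out) := by unfold Spec_solution; infer_instance

-- ===== CLAIM (what is proved, stated in full; the proofs are below) =====
def Claim_equal_solution : Prop := ∀ (N : Int) (S : String), Dom_solution N S → Pre_solution N S → Spec_solution N S (solution N S)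

-- ===== LEMMAS AND PROOFS =====

-- last character of r lies in cs (false for r = [])
def lastB (cs r : List Char) : Bool :=
  match PySem.List.pyGet? r (-1) with
  | some c => cs.contains c
  | none => false

-- one step of A's first loop, with the (provably dead) continue branch removed
def solStep (st : PySem.Set (List Char) × PySem.Set (List Char) × PySem.Set (List Char))
    (r : List Char) : PySem.Set (List Char) × PySem.Set (List Char) × PySem.Set (List Char) :=
  match PySem.List.pyGet? r (-1) with
  | none => st
  | some c =>
    (if (['B','C','D','E'] : List Char).contains c then st.1.add r else st.1,
     if (['F','G','H','J'] : List Char).contains c then st.2.1.add r else st.2.1,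
     if (['D','E','F','G'] : List Char).contains c then st.2.2.add r else st.2.2)

lemma pyGet_neg1_isSome (r : List Char) (h : r ≠ []) : (PySem.List.pyGet? r (-1)).isSome := by
  have hn : 0 < r.length := List.length_pos_of_ne_nil h
  simp [PySem.List.pyGet?, PySem.List.pyIdx?, Nat.one_le_iff_ne_zero.mpr (by omega : r.length ≠ 0)]
  omega

lemma pyGet_nil_neg1 : PySem.List.pyGet? ([] : List Char) (-1) = none := rfl

lemma char_disj (c : Char) (h1 : (['B','C','D','E'] : List Char).contains c = true)
    (h2 : (['F','G','H','J'] : List Char).contains c = true) : False := by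
  simp only [List.contains_eq_mem, List.mem_cons, List.not_mem_nil, or_false,
    decide_eq_true_eq] at h1 h2
  rcases h1 with rfl | rfl | rfl | rfl <;> simp at h2

lemma not_both (x : List Char) (h1 : lastB ['B','C','D','E'] x = true)
    (h2 : lastB ['F','G','H','J'] x = true) : False := by
  unfold lastB at h1 h2
  cases hp : PySem.List.pyGet? x (-1) <;> rw [hp] at h1 h2
  · exact Bool.noConfusion h1
  · exact char_disj _ h1 h2

lemma char_defg (c : Char) (h : (['D','E','F','G'] : List Char).contains c = true) :
    (['B','C','D','E'] : List Char).contains c = true ∨ (['F','G','H','J'] : List Char).contains c = true := by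
  simp only [List.contains_eq_mem, List.mem_cons, List.not_mem_nil, or_false,
    decide_eq_true_eq] at h ⊢
  rcases h with rfl | rfl | rfl | rfl <;> simp

lemma lastB_defg (x : List Char) (h : lastB ['D','E','F','G'] x = true) :
    lastB ['B','C','D','E'] x = true ∨ lastB ['F','G','H','J'] x = true := by
  unfold lastB at h ⊢
  cases hp : PySem.List.pyGet? x (-1) <;> rw [hp] at h
  · exact Bool.noConfusion h
  · exact char_defg _ h

-- A's first loop never takes the continue branch and never hits IndexError on
-- nonempty tokens: it is the plain fold of solStep
lemma loopA_eq (toks : List (List Char)) : ∀ l ri m,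
    (∀ r ∈ toks, r ≠ []) →
    (∀ x ∈ l, lastB ['B','C','D','E'] x = true) →
    (∀ x ∈ ri, lastB ['F','G','H','J'] x = true) →
    solLoopA toks l ri m = some (toks.foldl solStep (l, ri, m)) := by
  induction toks with
  | nil => intro l ri m _ _ _; rfl
  | cons r rest ih =>
    intro l ri m hne hl hr
    have hrne : r ≠ [] := hne r (List.mem_cons_self ..)
    obtain ⟨c, hc⟩ := Option.isSome_iff_exists.mp (pyGet_neg1_isSome r hrne)
    have hnb : ¬(l.contains (PySem.List.slice r none (some (-1))) = true ∧
        ri.contains (PySem.List.slice r none (some (-1))) = true) := by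
      rintro ⟨ha, hb⟩
      exact not_both _ (hl _ (by simpa [List.contains_eq_mem] using ha))
        (hr _ (by simpa [List.contains_eq_mem] using hb))
    have hcond : (l.contains (PySem.List.slice r none (some (-1))) &&
        ri.contains (PySem.List.slice r none (some (-1))) &&
        m.contains (PySem.List.slice r none (some (-1)))) = false := by
      cases ha : l.contains (PySem.List.slice r none (some (-1))) <;>
        cases hb : ri.contains (PySem.List.slice r none (some (-1))) <;> simp
      exact absurd ⟨ha, hb⟩ hnb
    show solLoopA (r :: rest) l ri m = _
    rw [solLoopA, hcond]
    simp only [Bool.false_eq_true, if_false, hc]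
    rw [List.foldl_cons, show solStep (l, ri, m) r =
      (if (['B','C','D','E'] : List Char).contains c then l.add r else l,
       if (['F','G','H','J'] : List Char).contains c then ri.add r else ri,
       if (['D','E','F','G'] : List Char).contains c then m.add r else m) from by
        simp [solStep, hc]]
    apply ih _ _ _ (fun t ht => hne t (List.mem_cons_of_mem _ ht))
    · split_ifs with hb
      · intro x hx
        rcases (PySem.Set.mem_add l r x).mp hx with h | rfl
        · exact hl x h
        · unfold lastB; rw [hc]; exact hb
      · exact hl
    · split_ifs with hb
      · intro x hx
        rcases (PySem.Set.mem_add ri r x).mp hx with h | rfl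
        · exact hr x h
        · unfold lastB; rw [hc]; exact hb
      · exact hr

-- membership in the three folded sets
lemma fold_mem (toks : List (List Char)) : ∀ l ri m (x : List Char),
    (x ∈ (toks.foldl solStep (l, ri, m)).1 ↔ x ∈ l ∨ (x ∈ toks ∧ lastB ['B','C','D','E'] x = true)) ∧
    (x ∈ (toks.foldl solStep (l, ri, m)).2.1 ↔ x ∈ ri ∨ (x ∈ toks ∧ lastB ['F','G','H','J'] x = true)) ∧
    (x ∈ (toks.foldl solStep (l, ri, m)).2.2 ↔ x ∈ m ∨ (x ∈ toks ∧ lastB ['D','E','F','G'] x = true)) := by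
  induction toks with
  | nil => intro l ri m x; simp
  | cons r rest ih =>
    intro l ri m x
    rw [List.foldl_cons]
    cases hc : PySem.List.pyGet? r (-1) with
    | none =>
      have hstep : solStep (l, ri, m) r = (l, ri, m) := by simp [solStep, hc]
      rw [hstep]
      have hfr : ∀ cs, lastB cs r = false := fun cs => by unfold lastB; rw [hc]
      refine ⟨?_, ?_, ?_⟩ <;>
        [rw [(ih l ri m x).1]; rw [(ih l ri m x).2.1]; rw [(ih l ri m x).2.2]] <;>
        · simp only [List.mem_cons]
          by_cases hxr : x = r
          · subst hxr; simp [hfr]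
          · simp [hxr]
    | some c =>
      have hstep : solStep (l, ri, m) r =
        (if (['B','C','D','E'] : List Char).contains c then l.add r else l,
         if (['F','G','H','J'] : List Char).contains c then ri.add r else ri,
         if (['D','E','F','G'] : List Char).contains c then m.add r else m) := by
        simp [solStep, hc]
      rw [hstep]
      have hfr : ∀ cs, lastB cs r = cs.contains c := fun cs => by unfold lastB; rw [hc]
      refine ⟨?_, ?_, ?_⟩ <;>
        [rw [(ih _ _ _ x).1]; rw [(ih _ _ _ x).2.1]; rw [(ih _ _ _ x).2.2]] <;>
        · simp only [List.mem_cons]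
          split_ifs with hb <;> by_cases hxr : x = r <;>
            simp_all [PySem.Set.mem_add]

lemma fold_nodup (toks : List (List Char)) : ∀ l ri m,
    l.Nodup → ri.Nodup → m.Nodup →
    (toks.foldl solStep (l, ri, m)).1.Nodup ∧
    (toks.foldl solStep (l, ri, m)).2.1.Nodup ∧
    (toks.foldl solStep (l, ri, m)).2.2.Nodup := by
  induction toks with
  | nil => intro l ri m h1 h2 h3; exact ⟨h1, h2, h3⟩
  | cons r rest ih =>
    intro l ri m h1 h2 h3
    rw [List.foldl_cons]
    cases hc : PySem.List.pyGet? r (-1) with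
    | none =>
      rw [show solStep (l, ri, m) r = (l, ri, m) from by simp [solStep, hc]]
      exact ih l ri m h1 h2 h3
    | some c =>
      rw [show solStep (l, ri, m) r =
        (if (['B','C','D','E'] : List Char).contains c then l.add r else l,
         if (['F','G','H','J'] : List Char).contains c then ri.add r else ri,
         if (['D','E','F','G'] : List Char).contains c then m.add r else m) from by
          simp [solStep, hc]]
      apply ih <;> split_ifs <;>
        first
        | exact PySem.Set.nodup_add _ _ ‹_›
        | assumption

lemma solCount_eq (left right mid u : PySem.Set (List Char))
    (hmem : ∀ i ∈ u, i ∈ left ∨ i ∈ right)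
    (hdisj : ∀ i, i ∈ left → i ∈ right → False) :
    solCount left right mid u = (u.length : Int) := by
  unfold solCount
  rw [PySem.List.foldl_congr_mem u _ (fun acc _ => acc + (1 : Int)) 0 ?_]
  · rw [PySem.List.foldl_add u (fun _ => (1 : Int)) 0, PySem.List.sum_map_const_int]
    ring
  · intro acc x hx
    rcases hmem x hx with h | h
    · have hr' : x ∉ right := fun hr2 => hdisj x h hr2
      simp [h, hr']
    · have hl' : x ∉ left := fun hl2 => hdisj x hl2 h
      simp [h, hl']

lemma blocks_iff (x : List Char) :
    (lastB ['B','C','D','E'] x = true ∨ lastB ['F','G','H','J'] x = true ∨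
      lastB ['D','E','F','G'] x = true) ↔ solBlocks x = true := by
  unfold lastB solBlocks
  cases hp : PySem.List.pyGet? x (-1)
  · simp
  · rename_i c
    have hx : x ≠ [] := by rintro rfl; rw [pyGet_nil_neg1] at hp; simp at hp
    have hxe : x.isEmpty = false := by simp [hx]
    simp only [hxe, Bool.not_false, Bool.true_and]
    simp only [List.contains_eq_mem, List.mem_cons, List.not_mem_nil, or_false,
      decide_eq_true_eq]
    constructor
    · rintro ((rfl|rfl|rfl|rfl) | (rfl|rfl|rfl|rfl) | (rfl|rfl|rfl|rfl)) <;> simp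
    · rintro (rfl|rfl|rfl|rfl|rfl|rfl|rfl|rfl) <;> simp

-- ===== VERDICT (by name: the statement is the Claim_ definition above) =====
theorem solution_spec : Claim_equal_solution := by
  intro N S _ hpre
  unfold Spec_solution
  by_cases hS : S = ""
  · subst hS
    have h0 : (((PySem.Set.ofList ((PySem.Chars.splitOn ("" : String).toList [' ']).filter solBlocks)).length : Nat) : Int) = 0 := by decide
    unfold solution solution_alt
    rw [h0]
    norm_num
  · have hne : S.toList ≠ [] := by simpa [String.toList_eq_nil_iff] using hS
    have hEmpty : S.toList.isEmpty = false := by simp [hne]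
    rcases hpre with h | h
    · exact absurd h hS
    have hnne : ∀ r ∈ PySem.Chars.splitOn S.toList [' '], r ≠ [] :=
      fun r hr hrnil => h (hrnil ▸ hr)
    unfold solution solution_alt
    rw [hEmpty]
    simp only [Bool.false_eq_true, if_false]
    rw [loopA_eq _ _ _ _ hnne (by simp [PySem.Set.empty]) (by simp [PySem.Set.empty])]
    rcases ht : (PySem.Chars.splitOn S.toList [' ']).foldl solStep
        (PySem.Set.empty, PySem.Set.empty, PySem.Set.empty) with ⟨L, R, M⟩
    show solCount L R M ((L.union R).union M) +
        2 * (N - ((((L.union R).union M).length : Nat) : Int)) =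
      2 * N - ((PySem.Set.ofList ((PySem.Chars.splitOn S.toList [' ']).filter solBlocks)).length : Int)
    have hmemL := fun x => (fold_mem (PySem.Chars.splitOn S.toList [' ']) PySem.Set.empty PySem.Set.empty PySem.Set.empty x).1
    have hmemR := fun x => (fold_mem (PySem.Chars.splitOn S.toList [' ']) PySem.Set.empty PySem.Set.empty PySem.Set.empty x).2.1
    have hmemM := fun x => (fold_mem (PySem.Chars.splitOn S.toList [' ']) PySem.Set.empty PySem.Set.empty PySem.Set.empty x).2.2
    rw [ht] at hmemL hmemR hmemM
    simp only [PySem.Set.empty, List.not_mem_nil, false_or] at hmemL hmemR hmemM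
    have hnd := fold_nodup (PySem.Chars.splitOn S.toList [' '])
      PySem.Set.empty PySem.Set.empty PySem.Set.empty List.nodup_nil List.nodup_nil List.nodup_nil
    rw [ht] at hnd
    have hdisj : ∀ i, i ∈ L → i ∈ R → False := fun i hiL hiR =>
      not_both i ((hmemL i).mp hiL).2 ((hmemR i).mp hiR).2
    have hmemU : ∀ x, x ∈ (L.union R).union M ↔
        x ∈ PySem.Chars.splitOn S.toList [' '] ∧ solBlocks x = true := by
      intro x
      rw [PySem.Set.mem_union, PySem.Set.mem_union, hmemL, hmemR, hmemM]
      constructor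
      · rintro ((⟨hx, hb⟩ | ⟨hx, hb⟩) | ⟨hx, hb⟩) <;>
          exact ⟨hx, (blocks_iff x).mp (by tauto)⟩
      · rintro ⟨hx, hb⟩
        rcases (blocks_iff x).mpr hb with hb' | hb' | hb' <;> tauto
    have hsub : ∀ i ∈ (L.union R).union M, i ∈ L ∨ i ∈ R := by
      intro i hi
      rcases (PySem.Set.mem_union _ _ _).mp hi with hi' | hi'
      · exact (PySem.Set.mem_union _ _ _).mp hi'
      · rcases lastB_defg i ((hmemM i).mp hi').2 with hb | hb
        · exact Or.inl ((hmemL i).mpr ⟨((hmemM i).mp hi').1, hb⟩)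
        · exact Or.inr ((hmemR i).mpr ⟨((hmemM i).mp hi').1, hb⟩)
    rw [solCount_eq L R M _ hsub hdisj]
    have hUnd : ((L.union R).union M).Nodup :=
      PySem.Set.nodup_union _ _ (PySem.Set.nodup_union _ _ hnd.1)
    have hlen : ((L.union R).union M).length =
        (PySem.Set.ofList ((PySem.Chars.splitOn S.toList [' ']).filter solBlocks)).length := by
      refine ((List.perm_ext_iff_of_nodup hUnd (PySem.Set.nodup_ofList _)).mpr ?_).length_eq
      intro x
      rw [hmemU x, PySem.Set.mem_ofList, List.mem_filter]
    rw [hlen]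
    ring
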